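-- pv_equiv track=rewrite | github.com/ViktorTelecom/Basic | task_9_2.py | generate_trunk_config
-- ===== SOURCE A (Python) =====
-- def generate_trunk_config(trunk):
-- 	dictOutput = {}
--
--
-- 	trunk_template = ['switchport trunk encapsulation dot1q',
--                       'switchport mode trunk',
--                       'switchport trunk native vlan 999',
--                       'switchport trunk allowed vlan']
--
--
-- 	for key,value in trunk.items():
-- 		listOutput = []
-- 		for string in trunk_template:
-- 			strTemp = ' ' + string
-- 			if string.endswith('vlan'):
-- 				for vlan in value:
-- 					strTemp += ' ' + str(vlan)
-- 			listOutput.append(strTemp)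
--
-- 		dictOutput.update({key : listOutput})
--
-- 	return dictOutput
-- ===== SOURCE B (Python) =====
-- def generate_trunk_config(trunk):
--     return {key: [' switchport trunk encapsulation dot1q',
--                   ' switchport mode trunk',
--                   ' switchport trunk native vlan 999',
--                   ' switchport trunk allowed vlan'
--                   + ''.join(' ' + str(v) for v in value)]
--             for key, value in trunk.items()}
-- ===== Notes on version B (the rewrite author's own statement) =====
-- stated objective: simpler
-- what changed: Replaces the template-list scan with its endswith branch and inner string-growing loop by a single dict comprehension over three fixed lines plus a joined allowed-vlan line.
import Mathlib
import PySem

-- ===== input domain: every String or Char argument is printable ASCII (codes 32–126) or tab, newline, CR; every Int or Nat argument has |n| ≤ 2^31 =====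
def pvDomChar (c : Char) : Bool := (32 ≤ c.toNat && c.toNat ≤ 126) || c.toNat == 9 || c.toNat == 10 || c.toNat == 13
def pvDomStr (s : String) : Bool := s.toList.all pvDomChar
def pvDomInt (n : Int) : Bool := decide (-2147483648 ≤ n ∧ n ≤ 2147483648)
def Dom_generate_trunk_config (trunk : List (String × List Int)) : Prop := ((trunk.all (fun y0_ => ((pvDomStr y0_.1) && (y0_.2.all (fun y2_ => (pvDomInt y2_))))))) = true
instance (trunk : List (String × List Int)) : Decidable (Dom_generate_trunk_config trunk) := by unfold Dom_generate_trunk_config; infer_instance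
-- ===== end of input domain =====

-- B replaces A's template scan (endswith branch + string-growing vlan loop) by a direct
-- dict comprehension over three fixed lines plus a joined allowed-vlan line (objective: simpler).

-- ===== PORT A =====
def trunkTemplate : List String :=
  ["switchport trunk encapsulation dot1q",
   "switchport mode trunk",
   "switchport trunk native vlan 999",
   "switchport trunk allowed vlan"]

def generate_trunk_config (trunk : List (String × List Int)) : List (String × List String) :=
  (trunk.foldl (fun dictOutput kv =>
      let listOutput := trunkTemplate.foldl (fun acc s =>
          let strTemp := " " ++ s
          let strTemp := if PySem.Str.endswith s "vlan" then
              kv.2.foldl (fun t vlan => t ++ " " ++ PySem.Int.toStr vlan) strTemp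
            else strTemp
          acc ++ [strTemp]) []
      dictOutput.insert kv.1 listOutput) PySem.Dict.empty).items

-- ===== PORT B =====
def altLines (value : List Int) : List String :=
  [" switchport trunk encapsulation dot1q",
   " switchport mode trunk",
   " switchport trunk native vlan 999",
   " switchport trunk allowed vlan" ++
     PySem.Str.join "" (value.map (fun v => " " ++ PySem.Int.toStr v))]

def generate_trunk_config_alt (trunk : List (String × List Int)) : List (String × List String) :=
  (PySem.Dict.ofList (trunk.map (fun kv => (kv.1, altLines kv.2)))).items

-- ===== PRECONDITION & SPEC =====
def Spec_generate_trunk_config (trunk : List (String × List Int)) (out : List (String × List String)) : Prop := out = generate_trunk_config_alt trunk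
instance (trunk : List (String × List Int)) (out : List (String × List String)) : Decidable (Spec_generate_trunk_config trunk out) := by unfold Spec_generate_trunk_config; infer_instance

-- ===== CLAIM (what is proved, stated in full; the proofs are below) =====
def Claim_equal_generate_trunk_config : Prop := ∀ (trunk : List (String × List Int)), Dom_generate_trunk_config trunk → Spec_generate_trunk_config trunk (generate_trunk_config trunk)

-- ===== LEMMAS AND PROOFS =====

theorem join_empty_cons (x : String) (xs : List String) :
    PySem.Str.join "" (x :: xs) = x ++ PySem.Str.join "" xs := by
  simp only [PySem.Str.join, PySem.Chars.join, List.map]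
  show String.ofList ([].intercalate (x.toList :: List.map String.toList xs)) = _
  cases xs with
  | nil => simp [List.intercalate]
  | cons y ys => simp [List.intercalate, String.ofList_append]

-- the vlan-appending loop equals prefix ++ ''.join of the pieces
theorem vlan_foldl_eq (v : List Int) (s : String) :
    v.foldl (fun t vlan => t ++ " " ++ PySem.Int.toStr vlan) s
      = s ++ PySem.Str.join "" (v.map (fun x => " " ++ PySem.Int.toStr x)) := by
  induction v generalizing s with
  | nil => simp [PySem.Str.join]
  | cons x xs ih =>
      simp only [List.foldl, List.map]
      rw [ih, join_empty_cons]
      simp [String.append_assoc]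

-- per-key list built by A's template loop equals B's direct list
theorem lines_eq (v : List Int) :
    trunkTemplate.foldl (fun acc s =>
        let strTemp := " " ++ s
        let strTemp := if PySem.Str.endswith s "vlan" then
            v.foldl (fun t vlan => t ++ " " ++ PySem.Int.toStr vlan) strTemp
          else strTemp
        acc ++ [strTemp]) []
      = altLines v := by
  simp only [trunkTemplate, List.foldl]
  rw [if_neg (by decide), if_neg (by decide), if_neg (by decide), if_pos (by decide)]
  rw [vlan_foldl_eq]
  simp [altLines]

-- a foldl of inserts with values computed from each pair equals ofList of the mapped pairs
theorem foldl_insert_eq_ofList_map (trunk : List (String × List Int))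
    (f : List Int → List String) (d : PySem.Dict String (List String)) :
    trunk.foldl (fun d kv => d.insert kv.1 (f kv.2)) d
      = PySem.Dict.update d (trunk.map (fun kv => (kv.1, f kv.2))) := by
  induction trunk generalizing d with
  | nil => simp [PySem.Dict.update]
  | cons kv rest ih => simp [PySem.Dict.update, List.foldl] at *; rw [ih]

-- ===== VERDICT (by name: the statement is the Claim_ definition above) =====
theorem generate_trunk_config_spec : Claim_equal_generate_trunk_config := by
  intro trunk _
  unfold Spec_generate_trunk_config generate_trunk_config generate_trunk_config_alt
  rw [show (PySem.Dict.ofList (trunk.map (fun kv => (kv.1, altLines kv.2)))) =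
        PySem.Dict.update PySem.Dict.empty (trunk.map (fun kv => (kv.1, altLines kv.2))) from rfl,
      ← foldl_insert_eq_ofList_map trunk altLines]
  have hf : (fun (d : PySem.Dict String (List String)) (kv : String × List Int) =>
      d.insert kv.1 (trunkTemplate.foldl (fun acc s =>
        let strTemp := " " ++ s
        let strTemp := if PySem.Str.endswith s "vlan" then
            kv.2.foldl (fun t vlan => t ++ " " ++ PySem.Int.toStr vlan) strTemp
          else strTemp
        acc ++ [strTemp]) []))
      = fun d kv => d.insert kv.1 (altLines kv.2) := by
    funext d kv
    rw [lines_eq]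
  rw [hf]
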